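-- pv_equiv track=rewrite | github.com/ApoorvBrooklyn/Qualitas_Assignment | app5.py | chunk_data
-- ===== SOURCE A (Python) =====
-- def chunk_data(data, chunk_size=10):
--     if isinstance(data, dict):
--         # If data is a dictionary, convert it to a list of key-value pairs
--         items = list(data.items())
--     elif isinstance(data, list):
--         items = data
--     else:
--         raise TypeError("Data must be either a dictionary or a list")
--
--     return [dict(items[i:i + chunk_size]) for i in range(0, len(items), chunk_size)]
-- ===== SOURCE B (Python) =====
-- def chunk_data(data, chunk_size=10):
--     if isinstance(data, dict):
--         items = list(data.items())
--     elif isinstance(data, list):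
--         items = data
--     else:
--         raise TypeError("Data must be either a dictionary or a list")
--     chunks = []
--     cur = []
--     for item in items:
--         cur.append(item)
--         if len(cur) == chunk_size:
--             chunks.append(dict(cur))
--             cur = []
--     if cur:
--         chunks.append(dict(cur))
--     return chunks
-- ===== Notes on version B (the rewrite author's own statement) =====
-- stated objective: alternative
-- what changed: Replaced the range/slice list comprehension (dict() over each index window) by a single element-by-element pass that accumulates the current chunk in a list and flushes it as a dict every chunk_size elements; Pre_ excludes chunk_size = 0, where A raises ValueError (range step 0).
-- intended difference: For negative chunk_size on non-empty data A silently returns an empty list (an accident of range() yielding nothing), discarding all data; B returns all items in one chunk, which preserves the data and is the intended value for an unspecified size. — e.g. on chunk_data([("a", 1)], -1): A returns [], B returns [[("a", 1)]]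
import Mathlib
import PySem

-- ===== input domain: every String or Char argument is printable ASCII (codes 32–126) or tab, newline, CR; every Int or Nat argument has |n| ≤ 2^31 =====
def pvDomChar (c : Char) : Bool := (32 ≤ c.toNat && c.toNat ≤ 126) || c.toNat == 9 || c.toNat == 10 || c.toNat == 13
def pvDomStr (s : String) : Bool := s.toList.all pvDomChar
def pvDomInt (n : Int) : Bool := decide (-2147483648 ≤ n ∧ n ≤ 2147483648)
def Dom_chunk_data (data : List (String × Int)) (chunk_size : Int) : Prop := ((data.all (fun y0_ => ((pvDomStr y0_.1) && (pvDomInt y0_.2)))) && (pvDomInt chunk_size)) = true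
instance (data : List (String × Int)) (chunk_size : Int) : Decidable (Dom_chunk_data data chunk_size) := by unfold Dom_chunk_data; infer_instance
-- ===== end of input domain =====

-- B replaces A's index-window slicing + per-window dict() by a single element-by-element pass
-- accumulating the current chunk in a list (objective: alternative decomposition, same cost).
-- Equivalence is about the RETURN value; neither program mutates its arguments.

-- ===== PORT A =====
-- return [dict(items[i:i + chunk_size]) for i in range(0, len(items), chunk_size)]
def chunk_data (data : List (String × Int)) (chunk_size : Int) : List (List (String × Int)) :=
  (PySem.List.pyRange 0 (PySem.List.len data) chunk_size).map
    (fun i => (PySem.Dict.ofList (PySem.List.slice data (some i) (some (i + chunk_size)))).items)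

-- ===== PORT B =====
-- the `for item in items` loop of Source B, carrying (current chunk list, result)
def chunkLoopB (chunk_size : Int) (items cur : List (String × Int))
    (chunks : List (List (String × Int))) : List (List (String × Int)) :=
  match items with
  | [] => if cur ≠ [] then chunks ++ [(PySem.Dict.ofList cur).items] else chunks
  | x :: rest =>
      let cur' := cur ++ [x]
      if ((cur'.length : Int) = chunk_size) then
        chunkLoopB chunk_size rest [] (chunks ++ [(PySem.Dict.ofList cur').items])
      else chunkLoopB chunk_size rest cur' chunks

def chunk_data_alt (data : List (String × Int)) (chunk_size : Int) : List (List (String × Int)) :=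
  chunkLoopB chunk_size data [] []

-- ===== PRECONDITION & SPEC =====
-- Pre_ excludes exactly chunk_size = 0, where A raises ValueError (range() step 0).
def Pre_chunk_data (data : List (String × Int)) (chunk_size : Int) : Prop := chunk_size ≠ 0
instance (data : List (String × Int)) (chunk_size : Int) : Decidable (Pre_chunk_data data chunk_size) := by unfold Pre_chunk_data; infer_instance
def pvWitness_chunk_data : (List (String × Int)) × Int := ([("a", 1), ("b", 2), ("a", 3)], 2)

-- For negative chunk_size on non-empty data A silently returns an empty list (range() yields
-- nothing), discarding all data; B returns all items in one chunk, which preserves the data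
-- and is the intended value for an unspecified size.
def D_chunk_data (data : List (String × Int)) (chunk_size : Int) : Prop :=
  chunk_size < 0 ∧ data ≠ []
instance (data : List (String × Int)) (chunk_size : Int) : Decidable (D_chunk_data data chunk_size) := by unfold D_chunk_data; infer_instance

def Spec_chunk_data (data : List (String × Int)) (chunk_size : Int) (out : List (List (String × Int))) : Prop := ¬ D_chunk_data data chunk_size → out = chunk_data_alt data chunk_size
instance (data : List (String × Int)) (chunk_size : Int) (out : List (List (String × Int))) : Decidable (Spec_chunk_data data chunk_size out) := by unfold Spec_chunk_data; infer_instance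

def pvDiffWitness_chunk_data : (List (String × Int)) × Int := ([("a", 1)], -1)
def pvDiffWitnessOut_chunk_data : (List (List (String × Int))) × (List (List (String × Int))) :=
  ([], [[("a", 1)]])

-- ===== CLAIM (what is proved, stated in full; the proofs are below) =====
def Claim_unchanged_chunk_data : Prop := ∀ (data : List (String × Int)) (chunk_size : Int), Dom_chunk_data data chunk_size → Pre_chunk_data data chunk_size → Spec_chunk_data data chunk_size (chunk_data data chunk_size)
def Claim_changed_chunk_data : Prop := Dom_chunk_data (pvDiffWitness_chunk_data.1) (pvDiffWitness_chunk_data.2) ∧ Pre_chunk_data (pvDiffWitness_chunk_data.1) (pvDiffWitness_chunk_data.2) ∧ D_chunk_data (pvDiffWitness_chunk_data.1) (pvDiffWitness_chunk_data.2) ∧ chunk_data (pvDiffWitness_chunk_data.1) (pvDiffWitness_chunk_data.2) = pvDiffWitnessOut_chunk_data.1 ∧ chunk_data_alt (pvDiffWitness_chunk_data.1) (pvDiffWitness_chunk_data.2) = pvDiffWitnessOut_chunk_data.2 ∧ pvDiffWitnessOut_chunk_data.1 ≠ pvDiffWitnessOut_chunk_data.2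
def Claim_exact_chunk_data : Prop := ∀ (data : List (String × Int)) (chunk_size : Int), Dom_chunk_data data chunk_size → Pre_chunk_data data chunk_size → D_chunk_data data chunk_size → chunk_data data chunk_size ≠ chunk_data_alt data chunk_size

-- ===== LEMMAS AND PROOFS =====

lemma pyRange_pos_step_cons (b c : Int) (hc : 0 < c) (hb : 0 < b) :
    PySem.List.pyRange 0 b c = 0 :: (PySem.List.pyRange 0 (b - c) c).map (· + c) := by
  rw [PySem.List.pyRange_of_pos _ _ hc, PySem.List.pyRange_of_pos _ _ hc]
  have hq0 : 0 ≤ (b - 1) / c := Int.ediv_nonneg (by omega) hc.le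
  have h1 : (b - 0 + c - 1) / c = (b - 1) / c + 1 := by
    have : b - 0 + c - 1 = (b - 1) + 1 * c := by ring
    rw [this, Int.add_mul_ediv_right _ _ hc.ne']
  by_cases hbc : 0 < b - c
  · have h2 : b - c - 0 + c - 1 = b - 1 := by ring
    rw [if_pos hb, if_pos hbc, h1, h2]
    have : ((b - 1) / c + 1).toNat = ((b - 1) / c).toNat + 1 := by omega
    rw [this, List.range_succ_eq_map]
    simp [List.map_map, Function.comp]
    intro k _
    ring
  · have h3 : (b - 1) / c = 0 := Int.ediv_eq_zero_of_lt (by omega) (by omega)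
    rw [if_pos hb, if_neg hbc, h1, h3]
    simp

def chunksTD (m : Nat) : List (String × Int) → List (List (String × Int))
  | [] => []
  | x :: xs => (PySem.Dict.ofList ((x :: xs).take (m + 1))).items :: chunksTD m (xs.drop m)
termination_by l => l.length
decreasing_by simp

lemma pyRange_pos_nonpos (b c : Int) (hc : 0 < c) (hb : b ≤ 0) : PySem.List.pyRange 0 b c = [] := by
  rw [PySem.List.pyRange_of_pos _ _ hc, if_neg (by omega)]
  simp

lemma slice_shift (L : List (String × Int)) (i c : Int) (hi : 0 ≤ i) (hc : 0 < c) :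
    PySem.List.slice L (some (i + c)) (some (i + c + c)) =
    PySem.List.slice (L.drop c.toNat) (some i) (some (i + c)) := by
  have h1 : (i + c).toNat = c.toNat + i.toNat := by omega
  rw [PySem.List.slice_toNat _ (by omega) (by omega), PySem.List.slice_toNat _ hi (by omega),
    List.drop_drop, h1]
  congr 1
  omega

lemma chunksTD_cons (m : Nat) (x : String × Int) (xs : List (String × Int)) :
    chunksTD m (x :: xs) =
      (PySem.Dict.ofList ((x :: xs).take (m + 1))).items :: chunksTD m (xs.drop m) := by
  rw [chunksTD]

lemma A_eq_chunksTD (c : Int) (hc : 0 < c) (L : List (String × Int)) :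
    chunk_data L c = chunksTD (c.toNat - 1) L := by
  have key : ∀ (N : Nat) (L : List (String × Int)), L.length ≤ N →
      chunk_data L c = chunksTD (c.toNat - 1) L := by
    intro N
    induction N with
    | zero =>
      intro L hL
      have : L = [] := List.eq_nil_of_length_eq_zero (by omega)
      subst this
      simp [chunk_data, chunksTD, pyRange_pos_nonpos 0 c hc le_rfl]
    | succ N ih =>
      intro L hL
      match L with
      | [] => simp [chunk_data, chunksTD, pyRange_pos_nonpos 0 c hc le_rfl]
      | x :: xs =>
        have hlen : (0:Int) < (((x :: xs).length : Nat) : Int) := by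
          simp only [List.length_cons]
          omega
        unfold chunk_data
        simp only [PySem.List.len_eq]
        rw [pyRange_pos_step_cons _ c hc hlen, List.map_cons, chunksTD_cons]
        have hhead : PySem.List.slice (x :: xs) (some 0) (some (0 + c)) = (x :: xs).take c.toNat := by
          rw [PySem.List.slice_toNat _ le_rfl (by omega)]
          simp
        have hm1 : c.toNat - 1 + 1 = c.toNat := by omega
        rw [hm1, hhead]
        congr 1
        have hdrop : xs.drop (c.toNat - 1) = (x :: xs).drop c.toNat := by
          obtain ⟨n, hn⟩ : ∃ n, c.toNat = n + 1 := ⟨c.toNat - 1, by omega⟩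
          rw [hn, List.drop_succ_cons]
          norm_num
        have ih' := ih ((x :: xs).drop c.toNat)
          (by simp only [List.length_drop, List.length_cons] at hL ⊢; omega)
        rw [hdrop, ← ih']
        unfold chunk_data
        simp only [PySem.List.len_eq]
        rw [List.map_map]
        by_cases hcl : c ≤ (((x :: xs).length : Nat) : Int)
        · have hlen2 : ((((x :: xs).drop c.toNat).length : Nat) : Int) =
              (((x :: xs).length : Nat) : Int) - c := by
            simp only [List.length_drop]
            omega
          rw [hlen2]
          apply List.map_congr_left
          intro i hi
          have hi0 : 0 ≤ i := ((PySem.List.mem_pyRange_iff_of_pos hc i).mp hi).1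
          simp only [Function.comp]
          rw [slice_shift _ i c hi0 hc]
        · rw [pyRange_pos_nonpos _ c hc (by omega),
            pyRange_pos_nonpos _ c hc
              (by simp only [List.length_drop]; omega)]
          simp
  exact key L.length L le_rfl

lemma chunksTD_nil (m : Nat) : chunksTD m [] = [] := by rw [chunksTD]

lemma chunksTD_ne (m : Nat) (l : List (String × Int)) (hl : l ≠ []) :
    chunksTD m l = (PySem.Dict.ofList (l.take (m + 1))).items :: chunksTD m (l.drop (m + 1)) := by
  match l with
  | [] => exact absurd rfl hl
  | x :: xs => rw [chunksTD_cons, List.drop_succ_cons]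

lemma loopB_eq (c : Int) (hc : 0 < c) (L : List (String × Int)) :
    ∀ (pre : List (String × Int)) (res : List (List (String × Int))),
      (pre.length : Int) < c →
      chunkLoopB c L pre res = res ++ chunksTD (c.toNat - 1) (pre ++ L) := by
  induction L with
  | nil =>
    intro pre res hlen
    match pre with
    | [] => simp [chunkLoopB, chunksTD_nil]
    | p :: ps =>
      rw [chunkLoopB]
      rw [if_pos (by simp)]
      rw [List.append_nil, chunksTD_cons]
      have h1 : (p :: ps).take (c.toNat - 1 + 1) = p :: ps := by
        apply List.take_of_length_le
        simp only [List.length_cons] at hlen ⊢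
        omega
      have h2 : ps.drop (c.toNat - 1) = [] := by
        apply List.drop_eq_nil_of_le
        simp only [List.length_cons] at hlen
        omega
      rw [h1, h2, chunksTD_nil]
  | cons kv rest ih =>
    intro pre res hlen
    rw [chunkLoopB]
    by_cases h : ((pre ++ [kv]).length : Int) = c
    · rw [if_pos h]
      have h0 : (([] : List (String × Int)).length : Int) < c := by simp; omega
      have ihh := ih [] (res ++ [(PySem.Dict.ofList (pre ++ [kv])).items]) h0
      simp only [List.nil_append] at ihh
      have hlen1 : (pre ++ [kv]).length = c.toNat := by
        simp only [List.length_append, List.length_singleton] at h ⊢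
        omega
      have hm1 : c.toNat - 1 + 1 = c.toNat := by omega
      rw [List.append_cons pre kv rest,
        chunksTD_ne _ ((pre ++ [kv]) ++ rest) (by simp), hm1,
        List.take_left' hlen1, List.drop_left' hlen1, ihh]
      simp [List.append_assoc]
    · rw [if_neg h]
      have hlen' : ((pre ++ [kv]).length : Int) < c := by
        simp only [List.length_append, List.length_singleton] at h ⊢
        push_cast at h ⊢
        omega
      have ihh := ih (pre ++ [kv]) res hlen'
      rw [ihh, List.append_assoc]
      simp

lemma B_eq_chunksTD (c : Int) (hc : 0 < c) (L : List (String × Int)) :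
    chunk_data_alt L c = chunksTD (c.toNat - 1) L := by
  have h := loopB_eq c hc L [] [] (by simpa using hc)
  simpa [chunk_data_alt] using h

lemma A_neg (c : Int) (hc : c < 0) (L : List (String × Int)) : chunk_data L c = [] := by
  simp [chunk_data, PySem.List.pyRange, hc.ne, not_lt.mpr hc.le]

lemma loopB_neg (c : Int) (hc : c < 0) (L : List (String × Int)) :
    ∀ (cur : List (String × Int)) (res : List (List (String × Int))),
      chunkLoopB c L cur res =
        if cur ++ L ≠ [] then res ++ [(PySem.Dict.ofList (cur ++ L)).items] else res := by
  induction L with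
  | nil => intro cur res; simp [chunkLoopB]
  | cons kv rest ih =>
    intro cur res
    rw [chunkLoopB]
    rw [if_neg (by intro h; have : (0:Int) ≤ ((cur ++ [kv]).length : Int) := by positivity
                   omega)]
    rw [ih]
    simp

lemma B_neg (c : Int) (hc : c < 0) (L : List (String × Int)) (hL : L ≠ []) :
    chunk_data_alt L c = [(PySem.Dict.ofList L).items] := by
  rw [chunk_data_alt, loopB_neg c hc L [] []]
  simp [hL]

-- ===== VERDICT (by name: the statements are the Claim_ definitions above) =====
theorem chunk_data_spec : Claim_unchanged_chunk_data := by
  intro data c _ hpre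
  unfold Spec_chunk_data
  intro hnd
  rcases lt_trichotomy c 0 with h | h | h
  · unfold D_chunk_data at hnd
    push_neg at hnd
    have hdata : data = [] := hnd h
    subst hdata
    rw [A_neg c h]
    simp [chunk_data_alt, chunkLoopB]
  · exact absurd h hpre
  · rw [A_eq_chunksTD c h, B_eq_chunksTD c h]

theorem chunk_data_changed : Claim_changed_chunk_data := by
  unfold Claim_changed_chunk_data; decide

theorem chunk_data_tight : Claim_exact_chunk_data := by
  intro data c _ _ hd
  obtain ⟨hneg, hne⟩ := hd
  rw [A_neg c hneg, B_neg c hneg data hne]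
  simp
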